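-- pv_equiv track=rewrite | github.com/mrbartrns/algorithm-and-structure | programmers/lv4_review/p17.py | solution
-- ===== SOURCE A (Python) =====
-- def solution(land, p, q):
--     blocks = []
--     total = 0
--     for i in range(len(land)):
--         for j in range(len(land)):
--             blocks.append(land[i][j])
--             total += land[i][j]
--     blocks.sort()
--     s = (total - blocks[0] * len(blocks)) * q
--     cost = s
--     for i in range(1, len(blocks)):
--         up = (blocks[i] - blocks[i - 1]) * i * p
--         down = (blocks[i] - blocks[i - 1]) * (len(blocks) - i) * q
--         s += up - down
--         cost = min(s, cost)
--     return cost
-- ===== SOURCE B (Python) =====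
-- def solution(land, p, q):
--     n = len(land)
--     flat = [land[i][j] for i in range(n) for j in range(n)]
--     total = sum(flat)
--     blocks = sorted(flat)
--     m = len(blocks)
--     prefix = [0]
--     for b in blocks:
--         prefix.append(prefix[-1] + b)
--     best = None
--     for k in range(m):
--         h = blocks[k]
--         c = p * (h * k - prefix[k]) + q * ((total - prefix[k + 1]) - h * (m - k - 1))
--         if best is None or c < best:
--             best = c
--     return best
-- ===== Notes on version B (the rewrite author's own statement) =====
-- stated objective: alternative
-- what changed: Replaces A's incremental delta accumulator (cost carried from one candidate height to the next) by a prefix-sum table over the sorted blocks from which each candidate's full cost is evaluated independently.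
import Mathlib
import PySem

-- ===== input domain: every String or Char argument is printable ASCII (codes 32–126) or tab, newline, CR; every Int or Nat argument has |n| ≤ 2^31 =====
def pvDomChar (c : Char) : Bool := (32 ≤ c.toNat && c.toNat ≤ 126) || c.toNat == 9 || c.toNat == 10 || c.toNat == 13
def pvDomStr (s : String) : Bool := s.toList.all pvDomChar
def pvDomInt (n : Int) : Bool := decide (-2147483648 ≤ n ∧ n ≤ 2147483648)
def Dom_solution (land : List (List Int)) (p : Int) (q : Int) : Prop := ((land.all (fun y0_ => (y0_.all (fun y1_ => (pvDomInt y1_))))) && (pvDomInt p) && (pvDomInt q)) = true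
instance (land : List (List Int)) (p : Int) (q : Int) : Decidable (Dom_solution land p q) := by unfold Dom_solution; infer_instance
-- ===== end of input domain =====

-- B evaluates each candidate height's cost directly from a pref-sum table instead of A's running delta accumulator; same asymptotic cost.

-- ===== PORT A =====
def solution (land : List (List Int)) (p : Int) (q : Int) : Int :=
  let n : Int := land.length
  let st := (PySem.List.pyRange 0 n 1).foldl (fun (acc : List Int × Int) i =>
      (PySem.List.pyRange 0 n 1).foldl (fun (acc2 : List Int × Int) j =>
        let v := PySem.List.pyGetD (PySem.List.pyGetD land i []) j 0
        (acc2.1 ++ [v], acc2.2 + v)) acc) ([], (0 : Int))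
  let blocks := PySem.List.sorted st.1 id false
  let total := st.2
  let m : Int := blocks.length
  let s := (total - PySem.List.pyGetD blocks 0 0 * m) * q
  let res := (PySem.List.pyRange 1 m 1).foldl (fun (sc : Int × Int) i =>
      let d := PySem.List.pyGetD blocks i 0 - PySem.List.pyGetD blocks (i - 1) 0
      let up := d * i * p
      let down := d * (m - i) * q
      let s' := sc.1 + up - down
      (s', min s' sc.2)) (s, s)
  res.2

-- ===== PORT B =====
def solution_alt (land : List (List Int)) (p : Int) (q : Int) : Int :=
  let n : Int := land.length
  let flat := (PySem.List.pyRange 0 n 1).flatMap (fun i =>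
      (PySem.List.pyRange 0 n 1).map (fun j =>
        PySem.List.pyGetD (PySem.List.pyGetD land i []) j 0))
  let total := flat.sum
  let blocks := PySem.List.sorted flat id false
  let m : Int := blocks.length
  let pref := blocks.foldl (fun pr b => pr ++ [PySem.List.pyGetD pr (-1) 0 + b]) [(0 : Int)]
  let best := (PySem.List.pyRange 0 m 1).foldl (fun (best : Option Int) k =>
      let h := PySem.List.pyGetD blocks k 0
      let c := p * (h * k - PySem.List.pyGetD pref k 0) +
               q * ((total - PySem.List.pyGetD pref (k + 1) 0) - h * (m - k - 1))
      match best with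
      | none => some c
      | some b0 => if c < b0 then some c else some b0) none
  best.getD 0

-- ===== PRECONDITION & SPEC =====
-- Pre_ excludes exactly the inputs where Python A raises IndexError: an empty grid
-- (blocks[0] on an empty list) or a row shorter than len(land) (land[i][j] out of range).
def Pre_solution (land : List (List Int)) (_p : Int) (_q : Int) : Prop :=
  land ≠ [] ∧ ∀ row ∈ land, land.length ≤ row.length
instance (land : List (List Int)) (_p : Int) (_q : Int) : Decidable (Pre_solution land _p _q) := by
  unfold Pre_solution; infer_instance

def pvWitness_solution : List (List Int) × Int × Int := ([[1, 3], [2, 0]], 2, 3)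

def Spec_solution (land : List (List Int)) (p : Int) (q : Int) (out : Int) : Prop := out = solution_alt land p q
instance (land : List (List Int)) (p : Int) (q : Int) (out : Int) : Decidable (Spec_solution land p q out) := by unfold Spec_solution; infer_instance

-- ===== CLAIM (what is proved, stated in full; the proofs are below) =====
def Claim_equal_solution : Prop := ∀ (land : List (List Int)) (p : Int) (q : Int), Dom_solution land p q → Pre_solution land p q → Spec_solution land p q (solution land p q)

-- ===== LEMMAS AND PROOFS =====

theorem solution_witness_ok :
    Dom_solution pvWitness_solution.1 pvWitness_solution.2.1 pvWitness_solution.2.2 ∧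
    Pre_solution pvWitness_solution.1 pvWitness_solution.2.1 pvWitness_solution.2.2 := by
  constructor <;> decide


-- proof-only helpers -----------------------------------------------------

-- prefix sum of the first k blocks
def pvP (b : List Int) (k : Nat) : Int := (b.take k).sum

-- full leveling cost when the target height is blocks[k]
def pvF (b : List Int) (T p q : Int) (k : Nat) : Int :=
  p * (b.getD k 0 * (k : Int) - pvP b k) +
  q * ((T - pvP b (k + 1)) - b.getD k 0 * ((b.length : Int) - (k : Int) - 1))

-- running minimum of pvF over 0..k
def pvG (b : List Int) (T p q : Int) : Nat → Int
  | 0 => pvF b T p q 0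
  | k + 1 => min (pvF b T p q (k + 1)) (pvG b T p q k)

-- index-fold over range(n) of xs[j] is a fold over (xs.take n)
theorem pv_idx_fold {α β : Type} (xs : List α) (d : α) (f : β → α → β) :
    ∀ (n : Nat), n ≤ xs.length → ∀ (acc : β),
    (PySem.List.pyRange 0 (n : Int) 1).foldl (fun a j => f a (PySem.List.pyGetD xs j d)) acc
      = (xs.take n).foldl f acc := by
  intro n
  induction n with
  | zero => intro _ acc; simp
  | succ k ih =>
    intro h acc
    have hcast : ((k + 1 : Nat) : Int) = (k : Int) + 1 := by push_cast; ring
    have hk : k < xs.length := by omega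
    have hsome : xs[k]? = some xs[k] := List.getElem?_eq_getElem hk
    rw [hcast, PySem.List.pyRange_one_succ_right (by positivity), List.foldl_append,
      ih (by omega), List.take_add_one, hsome]
    simp only [Option.toList_some, List.foldl_append, List.foldl_cons, List.foldl_nil,
      PySem.List.pyGetD_natCast, List.getD_eq_getElem?_getD, hsome, Option.getD_some]

-- index-map over range(n) of xs[j] is (xs.take n)
theorem pv_idx_map {α : Type} (xs : List α) (d : α) :
    ∀ (n : Nat), n ≤ xs.length →
    (PySem.List.pyRange 0 (n : Int) 1).map (fun j => PySem.List.pyGetD xs j d)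
      = xs.take n := by
  intro n
  induction n with
  | zero => intro _; simp
  | succ k ih =>
    intro h
    have hcast : ((k + 1 : Nat) : Int) = (k : Int) + 1 := by push_cast; ring
    have hk : k < xs.length := by omega
    have hsome : xs[k]? = some xs[k] := List.getElem?_eq_getElem hk
    rw [hcast, PySem.List.pyRange_one_succ_right (by positivity), List.map_append, ih (by omega),
      List.take_add_one, hsome]
    simp only [List.map_cons, List.map_nil, Option.toList_some, PySem.List.pyGetD_natCast,
      List.getD_eq_getElem?_getD, hsome, Option.getD_some]

-- the (blocks, total) accumulator fold appends the list and adds its sum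
theorem pv_pair_fold :
    ∀ (l : List Int) (acc : List Int × Int),
    l.foldl (fun (a : List Int × Int) v => (a.1 ++ [v], a.2 + v)) acc
      = (acc.1 ++ l, acc.2 + l.sum) := by
  intro l
  induction l with
  | nil => intro acc; simp
  | cons x tl ih => intro acc; simp [ih, add_assoc]

-- the prefix-list builder produces the table of prefix sums
theorem pv_pref_go :
    ∀ (l acc : List Int) (x0 : Int), acc.getLast? = some x0 →
    l.foldl (fun pr x => pr ++ [PySem.List.pyGetD pr (-1) 0 + x]) acc
      = acc ++ (List.range l.length).map (fun k => x0 + (l.take (k + 1)).sum) := by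
  intro l
  induction l with
  | nil => intro acc x0 _; simp
  | cons v tl ih =>
    intro acc x0 hlast
    have hne : acc ≠ [] := by intro h; subst h; simp at hlast
    have hget : PySem.List.pyGetD acc (-1) 0 = x0 := by
      rw [PySem.List.pyGetD_neg_one acc 0 hne]
      rw [List.getLast?_eq_some_getLast hne] at hlast
      exact (Option.some.inj hlast)
    have hlast' : (acc ++ [x0 + v]).getLast? = some (x0 + v) := by
      simp
    simp only [List.foldl_cons, hget]
    rw [ih (acc ++ [x0 + v]) (x0 + v) hlast']
    simp only [List.length_cons]
    rw [List.range_succ_eq_map]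
    simp [List.map_map, Function.comp_def, add_assoc]

theorem pv_pref (b : List Int) :
    b.foldl (fun pr x => pr ++ [PySem.List.pyGetD pr (-1) 0 + x]) [(0 : Int)]
      = (List.range (b.length + 1)).map (fun k => pvP b k) := by
  rw [pv_pref_go b [(0 : Int)] 0 (by simp), List.range_succ_eq_map]
  simp [pvP, List.map_map, Function.comp_def]

-- getting an entry of the prefix table
theorem pv_pref_get (b : List Int) (k : Nat) (hk : k ≤ b.length) :
    PySem.List.pyGetD ((List.range (b.length + 1)).map (fun k => pvP b k)) (k : Int) 0
      = pvP b k := by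
  rw [PySem.List.pyGetD_natCast]
  have hk' : k < ((List.range (b.length + 1)).map (fun k => pvP b k)).length := by
    simp; omega
  rw [List.getD_eq_getElem _ _ hk']
  simp

-- prefix-table entry, Int-index form
theorem pv_pref_get_int (b : List Int) (i : Int) (h0 : 0 ≤ i) (hk : i ≤ (b.length : Int)) :
    PySem.List.pyGetD ((List.range (b.length + 1)).map (fun k => pvP b k)) i 0 = pvP b i.toNat := by
  obtain ⟨k, rfl⟩ := Int.eq_ofNat_of_zero_le h0
  rw [Int.toNat_natCast]
  exact pv_pref_get b k (by exact_mod_cast hk)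

-- characterisation of A's delta loop: state after indices 1..i is (pvF i, pvG i)
theorem pv_Aloop (b : List Int) (T p q : Int) (hb : b ≠ []) :
    ∀ (i : Nat), i < b.length →
    (PySem.List.pyRange 1 ((i : Int) + 1) 1).foldl
      (fun (sc : Int × Int) j =>
        let d := PySem.List.pyGetD b j 0 - PySem.List.pyGetD b (j - 1) 0
        let up := d * j * p
        let down := d * ((b.length : Int) - j) * q
        let s' := sc.1 + up - down
        (s', min s' sc.2))
      ((T - PySem.List.pyGetD b 0 0 * (b.length : Int)) * q,
       (T - PySem.List.pyGetD b 0 0 * (b.length : Int)) * q)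
      = (pvF b T p q i, pvG b T p q i) := by
  intro i
  induction i with
  | zero =>
    intro _
    rw [PySem.List.pyRange_one_eq_nil (by omega)]
    obtain ⟨x, tl⟩ := b
    · exact absurd rfl hb
    · simp [pvF, pvG, pvP, PySem.List.pyGetD_zero]
      ring
  | succ k ih =>
    intro hk1
    have hk : k < b.length := by omega
    have hc1 : ((k : Int) + 1) = ((k + 1 : Nat) : Int) := by push_cast; ring
    rw [show ((k + 1 : Nat) : Int) + 1 = ((k : Int) + 1) + 1 by push_cast; ring]
    rw [PySem.List.pyRange_one_succ_right (by omega), List.foldl_append, ih hk]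
    simp only [List.foldl_cons, List.foldl_nil]
    have hget1 : PySem.List.pyGetD b ((k : Int) + 1) 0 = b.getD (k + 1) 0 := by
      rw [hc1, PySem.List.pyGetD_natCast]
    have hget0 : PySem.List.pyGetD b ((k : Int) + 1 - 1) 0 = b.getD k 0 := by
      rw [show (k : Int) + 1 - 1 = (k : Int) by ring, PySem.List.pyGetD_natCast]
    have hP1 : pvP b (k + 1) = pvP b k + b.getD k 0 := by
      simp [pvP, List.sum_take_succ b k hk, List.getElem?_eq_getElem hk]
    have hP2 : pvP b (k + 2) = pvP b (k + 1) + b.getD (k + 1) 0 := by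
      simp [pvP, List.sum_take_succ b (k + 1) hk1, List.getElem?_eq_getElem hk1]
    have hf : pvF b T p q k
        + (b.getD (k + 1) 0 - b.getD k 0) * ((k : Int) + 1) * p
        - (b.getD (k + 1) 0 - b.getD k 0) * ((b.length : Int) - ((k : Int) + 1)) * q
        = pvF b T p q (k + 1) := by
      simp only [pvF, hP2, hP1]
      push_cast
      ring
    rw [hget1, hget0, hf]
    simp [pvG]

-- characterisation of B's candidate loop: running minimum of pvF over 0..i
theorem pv_Bloop (b : List Int) (T p q : Int) (_hb : b ≠ []) :
    ∀ (i : Nat), i < b.length →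
    (PySem.List.pyRange 0 ((i : Int) + 1) 1).foldl
      (fun (best : Option Int) j =>
        let h := PySem.List.pyGetD b j 0
        let c := p * (h * j - PySem.List.pyGetD ((List.range (b.length + 1)).map (fun k => pvP b k)) j 0) +
                 q * ((T - PySem.List.pyGetD ((List.range (b.length + 1)).map (fun k => pvP b k)) (j + 1) 0) - h * ((b.length : Int) - j - 1))
        match best with
        | none => some c
        | some b0 => if c < b0 then some c else some b0) none
      = some (pvG b T p q i) := by
  intro i
  induction i with
  | zero =>
    intro h0
    rw [show ((0 : Nat) : Int) + 1 = 0 + 1 by norm_num, PySem.List.pyRange_one_singleton]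
    simp only [List.foldl_cons, List.foldl_nil]
    rw [PySem.List.pyGetD_zero b, pv_pref_get_int b 0 (by norm_num) (by positivity),
      pv_pref_get_int b (0 + 1) (by norm_num) (by exact_mod_cast h0)]
    simp [pvG, pvF, pvP]
  | succ k ih =>
    intro hk1
    have hk : k < b.length := by omega
    have hc1 : ((k : Int) + 1) = ((k + 1 : Nat) : Int) := by push_cast; ring
    rw [show ((k + 1 : Nat) : Int) + 1 = ((k : Int) + 1) + 1 by push_cast; ring]
    rw [PySem.List.pyRange_one_succ_right (by omega), List.foldl_append, ih hk]
    simp only [List.foldl_cons, List.foldl_nil]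
    rw [show (k : Int) + 1 + 1 = ((k + 2 : Nat) : Int) by push_cast; ring]
    rw [hc1, PySem.List.pyGetD_natCast b, pv_pref_get b (k + 1) (by omega),
      pv_pref_get b (k + 2) (by omega)]
    have hcand : p * (b.getD (k + 1) 0 * ((k + 1 : Nat) : Int) - pvP b (k + 1)) +
        q * ((T - pvP b (k + 2)) - b.getD (k + 1) 0 * ((b.length : Int) - ((k + 1 : Nat) : Int) - 1))
        = pvF b T p q (k + 1) := by
      simp only [pvF]
      try push_cast
      try ring
    rw [hcand]
    rcases lt_or_ge (pvF b T p q (k + 1)) (pvG b T p q k) with h | h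
    · simp [pvG, h, min_eq_left h.le]
    · simp [pvG, not_lt.mpr h, min_eq_right h]


-- let-free top-level corollary of pv_Aloop at i = b.length - 1
theorem pv_Aloop_top (b : List Int) (T p q : Int) (hb : b ≠ []) :
    (List.foldl
      (fun (sc : Int × Int) j =>
        (sc.1 + (PySem.List.pyGetD b j 0 - PySem.List.pyGetD b (j - 1) 0) * j * p -
           (PySem.List.pyGetD b j 0 - PySem.List.pyGetD b (j - 1) 0) * ((b.length : Int) - j) * q,
         min (sc.1 + (PySem.List.pyGetD b j 0 - PySem.List.pyGetD b (j - 1) 0) * j * p -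
           (PySem.List.pyGetD b j 0 - PySem.List.pyGetD b (j - 1) 0) * ((b.length : Int) - j) * q) sc.2))
      ((T - PySem.List.pyGetD b 0 0 * (b.length : Int)) * q,
       (T - PySem.List.pyGetD b 0 0 * (b.length : Int)) * q)
      (PySem.List.pyRange 1 (b.length : Int) 1)).2
      = pvG b T p q (b.length - 1) := by
  have hlen : 1 ≤ b.length := List.length_pos_iff.mpr hb
  have h := pv_Aloop b T p q hb (b.length - 1) (by omega)
  rw [show ((b.length - 1 : Nat) : Int) + 1 = (b.length : Int) by omega] at h
  exact congrArg Prod.snd h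

-- let-free top-level corollary of pv_Bloop at i = b.length - 1
theorem pv_Bloop_top (b : List Int) (T p q : Int) (hb : b ≠ []) :
    (List.foldl
      (fun (best : Option Int) j =>
        match best with
        | none => some (p * (PySem.List.pyGetD b j 0 * j -
              PySem.List.pyGetD ((List.range (b.length + 1)).map (fun k => pvP b k)) j 0) +
            q * ((T - PySem.List.pyGetD ((List.range (b.length + 1)).map (fun k => pvP b k)) (j + 1) 0) -
              PySem.List.pyGetD b j 0 * ((b.length : Int) - j - 1)))
        | some b0 =>
            if p * (PySem.List.pyGetD b j 0 * j -
              PySem.List.pyGetD ((List.range (b.length + 1)).map (fun k => pvP b k)) j 0) +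
            q * ((T - PySem.List.pyGetD ((List.range (b.length + 1)).map (fun k => pvP b k)) (j + 1) 0) -
              PySem.List.pyGetD b j 0 * ((b.length : Int) - j - 1)) < b0 then
              some (p * (PySem.List.pyGetD b j 0 * j -
                PySem.List.pyGetD ((List.range (b.length + 1)).map (fun k => pvP b k)) j 0) +
              q * ((T - PySem.List.pyGetD ((List.range (b.length + 1)).map (fun k => pvP b k)) (j + 1) 0) -
                PySem.List.pyGetD b j 0 * ((b.length : Int) - j - 1)))
            else some b0)
      none (PySem.List.pyRange 0 (b.length : Int) 1))
      = some (pvG b T p q (b.length - 1)) := by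
  have hlen : 1 ≤ b.length := List.length_pos_iff.mpr hb
  have h := pv_Bloop b T p q hb (b.length - 1) (by omega)
  rw [show ((b.length - 1 : Nat) : Int) + 1 = (b.length : Int) by omega] at h
  exact h

-- A's nested flatten loop in let-free form
theorem pv_A_flatten (land : List (List Int))
    (hrows : ∀ row ∈ land, land.length ≤ row.length) :
    List.foldl
      (fun (acc : List Int × Int) i =>
        List.foldl
          (fun (acc2 : List Int × Int) j =>
            (acc2.1 ++ [PySem.List.pyGetD (PySem.List.pyGetD land i []) j 0],
             acc2.2 + PySem.List.pyGetD (PySem.List.pyGetD land i []) j 0))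
          acc (PySem.List.pyRange 0 (land.length : Int) 1))
      ([], (0 : Int)) (PySem.List.pyRange 0 (land.length : Int) 1)
      = ((land.map (fun r => r.take land.length)).flatten,
         ((land.map (fun r => r.take land.length)).flatten).sum) := by
  have h1 := PySem.List.foldl_pyRange_zero_pyGetD' land ([] : List Int)
    (fun (acc : List Int × Int) row =>
      List.foldl
        (fun (acc2 : List Int × Int) j =>
          (acc2.1 ++ [PySem.List.pyGetD row j 0], acc2.2 + PySem.List.pyGetD row j 0))
        acc (PySem.List.pyRange 0 (land.length : Int) 1))
    (([], (0 : Int)) : List Int × Int)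
  rw [h1]
  have h2 : ∀ (rows : List (List Int)), (∀ row ∈ rows, land.length ≤ row.length) →
      ∀ (acc : List Int × Int),
      rows.foldl
        (fun (acc : List Int × Int) row =>
          List.foldl
            (fun (acc2 : List Int × Int) j =>
              (acc2.1 ++ [PySem.List.pyGetD row j 0], acc2.2 + PySem.List.pyGetD row j 0))
            acc (PySem.List.pyRange 0 (land.length : Int) 1)) acc
        = (acc.1 ++ (rows.map (fun r => r.take land.length)).flatten,
           acc.2 + ((rows.map (fun r => r.take land.length)).flatten).sum) := by
    intro rows
    induction rows with
    | nil => intro _ acc; simp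
    | cons r tl ih =>
      intro hr acc
      simp only [List.foldl_cons]
      rw [show List.foldl
            (fun (acc2 : List Int × Int) j =>
              (acc2.1 ++ [PySem.List.pyGetD r j 0], acc2.2 + PySem.List.pyGetD r j 0))
            acc (PySem.List.pyRange 0 (land.length : Int) 1)
          = (r.take land.length).foldl
            (fun (a : List Int × Int) v => (a.1 ++ [v], a.2 + v)) acc
          from pv_idx_fold r 0 (fun (a : List Int × Int) v => (a.1 ++ [v], a.2 + v)) land.length (hr r (by simp)) acc]
      rw [pv_pair_fold]
      rw [ih (fun row hrow => hr row (by simp [hrow]))]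
      simp [add_assoc]
  rw [h2 land hrows ([], 0)]
  simp

-- B's flattening comprehension equals the same concatenation
theorem pv_B_flatten (land : List (List Int))
    (hrows : ∀ row ∈ land, land.length ≤ row.length) :
    (PySem.List.pyRange 0 (land.length : Int) 1).flatMap
      (fun i => (PySem.List.pyRange 0 (land.length : Int) 1).map
        (fun j => PySem.List.pyGetD (PySem.List.pyGetD land i []) j 0))
      = (land.map (fun r => r.take land.length)).flatten := by
  rw [List.flatMap_def]
  have hmc : (PySem.List.pyRange 0 (land.length : Int) 1).map
      (fun i => (PySem.List.pyRange 0 (land.length : Int) 1).map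
        (fun j => PySem.List.pyGetD (PySem.List.pyGetD land i []) j 0))
      = (PySem.List.pyRange 0 (land.length : Int) 1).map
        (fun i => (PySem.List.pyGetD land i []).take land.length) := by
    apply List.map_congr_left
    intro i hi
    rw [PySem.List.mem_pyRange_one] at hi
    have hmem : PySem.List.pyGetD land i [] ∈ land := by
      apply PySem.List.pyGetD_mem
      constructor <;> omega
    exact pv_idx_map (PySem.List.pyGetD land i []) 0 land.length (hrows _ hmem)
  rw [hmc]
  have h3 : (fun i => (PySem.List.pyGetD land i []).take land.length)
      = (fun r : List Int => List.take land.length r) ∘ (fun i => PySem.List.pyGetD land i []) := rfl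
  rw [h3, ← List.map_map, PySem.List.map_pyGetD_pyRange_zero']

-- the flattened list is nonempty when the grid is
theorem pv_flat_ne (land : List (List Int)) (hne : land ≠ [])
    (hrows : ∀ row ∈ land, land.length ≤ row.length) :
    (land.map (fun r => r.take land.length)).flatten ≠ [] := by
  obtain ⟨r, tl, rfl⟩ := List.exists_cons_of_ne_nil hne
  have hr : (r.take (r :: tl).length) ≠ [] := by
    have h1 : (r :: tl).length ≤ r.length := hrows r (by simp)
    have : (r.take (r :: tl).length).length = (r :: tl).length := by
      rw [List.length_take]; omega
    intro hnil
    rw [hnil] at this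
    simp at this
  simp only [List.map_cons, List.flatten_cons]
  intro h
  rcases List.append_eq_nil_iff.mp h with ⟨h1, _⟩
  exact hr h1

-- ===== VERDICT (by name: the statement is the Claim_ definition above) =====
theorem solution_spec : Claim_equal_solution := by
  intro land p q _ hpre
  obtain ⟨hne, hrows⟩ := hpre
  unfold Spec_solution
  have hflatne := pv_flat_ne land hne hrows
  have hb : PySem.List.sorted ((land.map (fun r => r.take land.length)).flatten) id false ≠ [] := by
    intro h
    apply hflatne
    have := PySem.List.length_sorted ((land.map (fun r => r.take land.length)).flatten) id false
    rw [h] at this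
    simpa using (List.eq_nil_of_length_eq_zero this.symm)
  simp only [solution, solution_alt]
  rw [pv_A_flatten land hrows, pv_B_flatten land hrows]
  simp only []
  rw [pv_pref, pv_Aloop_top _ _ p q hb, pv_Bloop_top _ _ p q hb]
  simp
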